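-- pv_equiv track=rewrite | github.com/sgsmob/peer_review_assignments | team_assignments.py | get_teams_of_size
-- ===== SOURCE A (Python) =====
-- def get_teams_of_size(teams_list):
--     teams_of_size = [list() for _ in range(max(teams_list))]
--     teams_of_size_index = [dict() for _ in teams_of_size]
--     for team, size in enumerate(teams_list):
--         for i in range(size):
--             teams_of_size_index[i][team] = len(teams_of_size[i])
--             teams_of_size[i].append(team)
--     return teams_of_size, teams_of_size_index
-- ===== SOURCE B (Python) =====
-- def get_teams_of_size(teams_list):
--     n = max(teams_list)
--     teams_of_size = [[team for team, size in enumerate(teams_list) if size > i]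
--                      for i in range(n)]
--     teams_of_size_index = [{team: pos for pos, team in enumerate(bucket)}
--                            for bucket in teams_of_size]
--     return teams_of_size, teams_of_size_index
-- ===== Notes on version B (the rewrite author's own statement) =====
-- stated objective: alternative
-- what changed: Replaces A's single scatter pass (mutating per-size buckets and index dicts in place for each team) with a transposed gather: for each size bucket a full filter pass over enumerate(teams_list) builds the bucket, and the reverse-index dicts are built afterwards by enumerating each finished bucket.
-- outside the precondition, e.g. on get_teams_of_size([]): A raises ValueError, B raises ValueError
import Mathlib
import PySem

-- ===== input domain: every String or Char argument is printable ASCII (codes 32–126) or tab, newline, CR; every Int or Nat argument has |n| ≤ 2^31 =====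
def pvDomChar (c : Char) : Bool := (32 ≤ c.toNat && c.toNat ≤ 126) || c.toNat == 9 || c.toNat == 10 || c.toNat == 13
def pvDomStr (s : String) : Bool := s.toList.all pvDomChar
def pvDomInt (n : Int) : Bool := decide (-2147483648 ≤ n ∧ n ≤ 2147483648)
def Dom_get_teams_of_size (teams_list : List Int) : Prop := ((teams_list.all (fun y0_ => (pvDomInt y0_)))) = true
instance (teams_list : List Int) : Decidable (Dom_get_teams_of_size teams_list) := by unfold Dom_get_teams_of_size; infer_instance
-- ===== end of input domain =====

-- B rebuilds each size bucket by a per-bucket filter pass over enumerate(teams_list) (a transposed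
-- gather) instead of A's single scatter pass that mutates all buckets and index dicts per team;
-- equal return values on nonempty input (A raises ValueError on []).

-- ===== PORT A =====
-- inner loop body: teams_of_size_index[i][team] = len(teams_of_size[i]); teams_of_size[i].append(team)
def stepA (team : Int) (st : List (List Int) × List (PySem.Dict Int Int)) (i : Int) :
    List (List Int) × List (PySem.Dict Int Int) :=
  let l := PySem.List.pyGetD st.1 i []
  let d := PySem.List.pyGetD st.2 i PySem.Dict.empty
  (PySem.List.pySetD st.1 i (l ++ [team]),
   PySem.List.pySetD st.2 i (d.insert team ((l.length : Int))))

-- for i in range(size): …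
def outerA (st : List (List Int) × List (PySem.Dict Int Int)) (p : Int × Int) :
    List (List Int) × List (PySem.Dict Int Int) :=
  (PySem.List.pyRange 0 p.2).foldl (stepA p.1) st

def get_teams_of_size (teams_list : List Int) : List (List Int) × (List (List (Int × Int))) :=
  match PySem.List.max? teams_list (fun x => x) with
  | none => ([], [])   -- max([]) raises ValueError in Python; excluded by Pre_
  | some m =>
    let teams_of_size : List (List Int) := (PySem.List.pyRange 0 m).map (fun _ => [])
    let teams_of_size_index : List (PySem.Dict Int Int) :=
      teams_of_size.map (fun _ => PySem.Dict.empty)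
    let st := (PySem.List.enumerate teams_list 0).foldl outerA
      (teams_of_size, teams_of_size_index)
    (st.1, st.2.map PySem.Dict.items)

-- ===== PORT B =====
-- [team for team, size in enumerate(teams_list) if size > i]
def bucketB (teams_list : List Int) (i : Int) : List Int :=
  ((PySem.List.enumerate teams_list 0).filter (fun p => i < p.2)).map (fun p => p.1)

-- {team: pos for pos, team in enumerate(bucket)}
def indexB (bucket : List Int) : List (Int × Int) :=
  (PySem.Dict.ofList ((PySem.List.enumerate bucket 0).map (fun q => (q.2, q.1)))).items

def get_teams_of_size_alt (teams_list : List Int) : List (List Int) × (List (List (Int × Int))) :=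
  match PySem.List.max? teams_list (fun x => x) with
  | none => ([], [])   -- max([]) raises ValueError; excluded by Pre_
  | some n =>
    let teams_of_size := (PySem.List.pyRange 0 n).map (bucketB teams_list)
    (teams_of_size, teams_of_size.map indexB)

-- ===== PRECONDITION & SPEC =====
-- A raises ValueError (max of empty sequence) on []; everything else is accepted.
def Pre_get_teams_of_size (teams_list : List Int) : Prop := teams_list ≠ []
instance (teams_list : List Int) : Decidable (Pre_get_teams_of_size teams_list) := by
  unfold Pre_get_teams_of_size; infer_instance
def pvWitness_get_teams_of_size : List Int := [2, 1]

def Spec_get_teams_of_size (teams_list : List Int) (out : List (List Int) × (List (List (Int × Int)))) : Prop := out = get_teams_of_size_alt teams_list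
instance (teams_list : List Int) (out : List (List Int) × (List (List (Int × Int)))) : Decidable (Spec_get_teams_of_size teams_list out) := by unfold Spec_get_teams_of_size; infer_instance

-- ===== CLAIM (what is proved, stated in full; the proofs are below) =====
def Claim_equal_get_teams_of_size : Prop := ∀ (teams_list : List Int), Dom_get_teams_of_size teams_list → Pre_get_teams_of_size teams_list → Spec_get_teams_of_size teams_list (get_teams_of_size teams_list)

-- ===== LEMMAS AND PROOFS =====

theorem enumerate_append_singleton (l : List Int) (a s : Int) :
    PySem.List.enumerate (l ++ [a]) s
      = PySem.List.enumerate l s ++ [(s + l.length, a)] := by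
  induction l generalizing s with
  | nil => simp [PySem.List.enumerate]
  | cons x t ih =>
      simp [PySem.List.enumerate, ih (s + 1)]
      ring

theorem innerA_spec (t : Int) (k : Nat) (L : List (List Int)) (D : List (PySem.Dict Int Int))
    (hk : k ≤ L.length) (hD : D.length = L.length) :
    let st := (PySem.List.pyRange 0 (k : Int)).foldl (stepA t) (L, D)
    st.1.length = L.length ∧ st.2.length = L.length ∧
    (∀ j : Nat, st.1[j]? = if j < k then (L[j]?).map (fun l => l ++ [t]) else L[j]?) ∧
    (∀ j : Nat, (hj : j < L.length) →
      st.2[j]? = if j < k then some ((D[j]'(by omega)).insert t ((L[j]'hj).length : Int))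
                 else some (D[j]'(by omega))) := by
  induction k with
  | zero =>
      refine ⟨rfl, hD, fun j => by simp, fun j hj => by
        simp [List.getElem?_eq_getElem (show j < D.length by omega)]⟩
  | succ k ih =>
      have hk' : k ≤ L.length := by omega
      obtain ⟨h1, h2, h3, h4⟩ := ih hk'
      have hrange : PySem.List.pyRange 0 ((k+1 : Nat) : Int)
          = PySem.List.pyRange 0 (k : Int) ++ [(k : Int)] := by
        push_cast
        exact PySem.List.pyRange_one_succ_right (by positivity)
      set stK := (PySem.List.pyRange 0 (k : Int)).foldl (stepA t) (L, D) with hstK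
      have hfold : (PySem.List.pyRange 0 ((k+1:Nat) : Int)).foldl (stepA t) (L, D)
          = stepA t stK (k : Int) := by
        rw [hrange, List.foldl_append]; rfl
      have hkL : k < L.length := by omega
      have hgl : PySem.List.pyGetD stK.1 (k : Int) [] = L[k] := by
        rw [PySem.List.pyGetD_natCast, List.getD_eq_getElem?_getD, h3 k]
        simp [List.getElem?_eq_getElem hkL]
      have hgd : PySem.List.pyGetD stK.2 (k : Int) PySem.Dict.empty = D[k]'(by omega) := by
        rw [PySem.List.pyGetD_natCast, List.getD_eq_getElem?_getD, h4 k hkL]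
        simp
      rw [hfold]
      simp only [stepA, PySem.List.pySetD_natCast, hgl, hgd]
      refine ⟨by simpa using h1, by simpa using h2, ?_, ?_⟩
      · intro j
        rw [List.getElem?_set]
        by_cases hjk : j = k
        · subst hjk
          simp [h1, hkL]
        · rw [if_neg (by omega : ¬ k = j), h3 j]
          by_cases hlt : j < k
          · rw [if_pos hlt, if_pos (by omega)]
          · rw [if_neg hlt, if_neg (by omega)]
      · intro j hj
        rw [List.getElem?_set]
        by_cases hjk : j = k
        · subst hjk
          simp [h2, hj]
        · rw [if_neg (by omega : ¬ k = j), h4 j hj]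
          by_cases hlt : j < k
          · rw [if_pos hlt, if_pos (by omega)]
          · rw [if_neg hlt, if_neg (by omega)]

theorem outerA_spec (tl : List Int) (s : Int) (L : List (List Int)) (D : List (PySem.Dict Int Int))
    (hD : D.length = L.length)
    (hsz : ∀ x ∈ tl, x ≤ (L.length : Int))
    (hit : ∀ j : Nat, (D[j]?).map PySem.Dict.items
            = (L[j]?).map (fun l => (PySem.List.enumerate l 0).map (fun q => (q.2, q.1))))
    (hlt : ∀ (j : Nat) (l : List Int), L[j]? = some l → ∀ a ∈ l, a < s) :
    let st := (PySem.List.enumerate tl s).foldl outerA (L, D)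
    st.1.length = L.length ∧ st.2.length = L.length ∧
    (∀ j : Nat, st.1[j]? = (L[j]?).map (fun l =>
        l ++ ((PySem.List.enumerate tl s).filter (fun p => (j : Int) < p.2)).map (fun p => p.1))) ∧
    (∀ j : Nat, (st.2[j]?).map PySem.Dict.items
      = (st.1[j]?).map (fun l => (PySem.List.enumerate l 0).map (fun q => (q.2, q.1)))) := by
  induction tl generalizing s L D with
  | nil =>
      refine ⟨rfl, hD, fun j => by simp [PySem.List.enumerate], fun j => by
        simpa [PySem.List.enumerate] using hit j⟩
  | cons x rest ih =>
      have hxL : x ≤ (L.length : Int) := hsz x (by simp)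
      -- the first outer step
      have hfold : (PySem.List.enumerate (x :: rest) s).foldl outerA (L, D)
          = (PySem.List.enumerate rest (s + 1)).foldl outerA (outerA (L, D) (s, x)) := by
        simp [PySem.List.enumerate]
      by_cases hx : x ≤ 0
      · -- empty inner range: state unchanged
        have h0 : outerA (L, D) (s, x) = (L, D) := by
          simp [outerA, PySem.List.pyRange_one_eq_nil hx]
        obtain ⟨c1, c2, c3, c4⟩ := ih (s + 1) L D hD
          (fun y hy => hsz y (by simp [hy]))
          hit
          (fun j l hl a ha => by have := hlt j l hl a ha; omega)
        rw [hfold, h0] at *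
        refine ⟨c1, c2, fun j => ?_, c4⟩
        rw [c3 j]
        have hcond : (decide ((j : Int) < x)) = false := by
          simp; omega
        simp [PySem.List.enumerate, hcond]
      · -- positive size: inner loop fires on buckets 0..x-1
        set k := x.toNat with hkdef
        have hxk : x = (k : Int) := by omega
        have hkL : k ≤ L.length := by omega
        obtain ⟨i1, i2, i3, i4⟩ := innerA_spec s k L D hkL hD
        set st1 := (PySem.List.pyRange 0 (k : Int)).foldl (stepA s) (L, D) with hst1
        have hout : outerA (L, D) (s, x) = st1 := by rw [outerA, hxk]
        have hD' : st1.2.length = st1.1.length := by rw [i1, i2]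
        have hsz' : ∀ y ∈ rest, y ≤ (st1.1.length : Int) := fun y hy => by
          rw [i1]; exact hsz y (by simp [hy])
        have hit' : ∀ j : Nat, (st1.2[j]?).map PySem.Dict.items
            = (st1.1[j]?).map (fun l => (PySem.List.enumerate l 0).map (fun q => (q.2, q.1))) := by
          intro j
          by_cases hj : j < L.length
          · rw [i4 j hj, i3 j]
            have hDj : (D[j]'(by omega)).items
                = (PySem.List.enumerate (L[j]'hj) 0).map (fun q => (q.2, q.1)) := by
              have h := hit j
              rw [List.getElem?_eq_getElem hj, List.getElem?_eq_getElem (show j < D.length by omega)] at h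
              simpa using h
            by_cases hjk : j < k
            · rw [if_pos hjk, if_pos hjk]
              have hkeys : (D[j]'(by omega)).keys = L[j]'hj := by
                show ((D[j]'(by omega)).items).map Prod.fst = _
                rw [hDj, List.map_map]
                have : (Prod.fst ∘ fun q : Int × Int => (q.2, q.1)) = Prod.snd := rfl
                rw [this, PySem.List.map_snd_enumerate]
              have hcont : (D[j]'(by omega)).contains s = false := by
                rw [← Bool.not_eq_true, PySem.Dict.contains_iff_mem_keys, hkeys]
                intro hmem
                exact absurd (hlt j _ (List.getElem?_eq_getElem hj) s hmem) (by omega)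
              rw [List.getElem?_eq_getElem hj, Option.map_some, Option.map_some, Option.map_some,
                PySem.Dict.items_insert_of_not_contains _ _ hcont, hDj, enumerate_append_singleton]
              simp
            · rw [if_neg hjk, if_neg hjk]
              rw [List.getElem?_eq_getElem hj]
              simpa using hDj
          · rw [List.getElem?_eq_none (by omega : st1.1.length ≤ j),
              List.getElem?_eq_none (by omega : st1.2.length ≤ j)]
            rfl
        have hlt' : ∀ (j : Nat) (l : List Int), st1.1[j]? = some l → ∀ a ∈ l, a < s + 1 := by
          intro j l hl a ha
          rw [i3 j] at hl
          by_cases hjk : j < k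
          · rw [if_pos hjk] at hl
            rcases Option.map_eq_some_iff.mp hl with ⟨l0, hl0, rfl⟩
            rcases List.mem_append.mp ha with h | h
            · have := hlt j l0 hl0 a h; omega
            · simp at h; omega
          · rw [if_neg hjk] at hl
            have := hlt j l hl a ha; omega
        obtain ⟨c1, c2, c3, c4⟩ := ih (s + 1) st1.1 st1.2 hD' hsz' hit' hlt'
        rw [hfold, hout]
        refine ⟨by rw [c1, i1], by rw [c2, i1], fun j => ?_, c4⟩
        rw [c3 j, i3 j]
        have hcons : PySem.List.enumerate (x :: rest) s
            = (s, x) :: PySem.List.enumerate rest (s + 1) := by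
          simp [PySem.List.enumerate]
        rw [hcons, List.filter_cons]
        by_cases hjk : j < k
        · have : (decide ((j : Int) < (s, x).2)) = true := by simp; omega
          rw [if_pos hjk, this, if_pos rfl]
          cases hLj : L[j]? with
          | none => rfl
          | some l => simp
        · have : (decide ((j : Int) < (s, x).2)) = false := by simp; omega
          rw [if_neg hjk, this]
          simp
theorem bucketB_nodup (tl : List Int) (i : Int) : (bucketB tl i).Nodup := by
  have hsub : (((PySem.List.enumerate tl 0).filter (fun p => decide (i < p.2))).map (fun p => p.1)).Sublist
      ((PySem.List.enumerate tl 0).map (fun p => p.1)) :=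
    List.Sublist.map (fun p => p.1) ((PySem.List.enumerate tl 0).filter_sublist)
  have : ((PySem.List.enumerate tl 0).map (fun p => p.1)).Nodup := by
    rw [PySem.List.map_fst_enumerate]
    exact PySem.List.nodup_pyRange_one 0 _
  exact this.sublist hsub

theorem indexB_eq (l : List Int) (hnd : l.Nodup) :
    indexB l = (PySem.List.enumerate l 0).map (fun q => (q.2, q.1)) := by
  unfold indexB
  rw [PySem.Dict.ofList, PySem.Dict.update]
  have h := PySem.Dict.items_foldl_insert_fresh
    ((PySem.List.enumerate l 0).map (fun q => (q.2, q.1)))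
    Prod.fst Prod.snd PySem.Dict.empty
    (fun a _ => PySem.Dict.contains_empty (ν := Int) a)
    (by
      rw [List.map_map]
      have : (Prod.fst ∘ fun q : Int × Int => (q.2, q.1)) = Prod.snd := rfl
      rw [this, PySem.List.map_snd_enumerate]
      exact hnd)
  simpa using h

theorem portA_eq_alt (tl : List Int) (hpre : tl ≠ []) : get_teams_of_size tl = get_teams_of_size_alt tl := by
  cases hmax : PySem.List.max? tl (fun x => x) with
  | none => exact absurd ((PySem.List.max?_eq_none_iff tl (fun x => x)).mp hmax) hpre
  | some m =>
    unfold get_teams_of_size get_teams_of_size_alt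
    rw [hmax]
    simp only []
    set L : List (List Int) := (PySem.List.pyRange 0 m).map (fun _ => []) with hL
    set D : List (PySem.Dict Int Int) := L.map (fun _ => PySem.Dict.empty) with hDdef
    set ts : List (List Int) := (PySem.List.pyRange 0 m).map (bucketB tl) with hts
    have hlen : L.length = (m - 0).toNat := by
      rw [hL, List.length_map, PySem.List.length_pyRange_one]
    have hD : D.length = L.length := by rw [hDdef, List.length_map]
    have hLj : ∀ j : Nat, (hj : j < L.length) → L[j] = [] := by
      intro j hj
      simp [hL]
    have hsz : ∀ x ∈ tl, x ≤ (L.length : Int) := by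
      intro x hx
      have := PySem.List.max?_isMax hmax x hx
      simp only at this
      omega
    have hit : ∀ j : Nat, (D[j]?).map PySem.Dict.items
        = (L[j]?).map (fun l => (PySem.List.enumerate l 0).map (fun q => (q.2, q.1))) := by
      intro j
      by_cases hj : j < L.length
      · rw [List.getElem?_eq_getElem hj, List.getElem?_eq_getElem (show j < D.length by omega)]
        have : D[j]'(by omega) = PySem.Dict.empty := by simp [hDdef]
        rw [this, hLj j hj]
        simp [PySem.List.enumerate, PySem.Dict.empty]
      · rw [List.getElem?_eq_none (by omega : L.length ≤ j),
          List.getElem?_eq_none (by omega : D.length ≤ j)]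
        rfl
    have hlt : ∀ (j : Nat) (l : List Int), L[j]? = some l → ∀ a ∈ l, a < 0 := by
      intro j l hl a ha
      rcases List.getElem?_eq_some_iff.mp hl with ⟨hj, rfl⟩
      rw [hLj j hj] at ha
      cases ha
    obtain ⟨c1, c2, c3, c4⟩ := outerA_spec tl 0 L D hD hsz hit hlt
    set st := (PySem.List.enumerate tl 0).foldl outerA (L, D) with hst
    have hrange_elt : ∀ (j : Nat) (v : Int), (PySem.List.pyRange 0 m)[j]? = some v → v = (j : Int) := by
      intro j v hv
      rcases List.getElem?_eq_some_iff.mp hv with ⟨hj, rfl⟩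
      rw [PySem.List.getElem_pyRange_one]
      ring
    have hfirst : st.1 = ts := by
      apply List.ext_getElem?
      intro j
      rw [c3 j]
      simp only [hL, hts, List.getElem?_map]
      cases hr : (PySem.List.pyRange 0 m)[j]? with
      | none => rfl
      | some v =>
          have hv := hrange_elt j v hr
          subst hv
          simp [bucketB]
    have hsecond : st.2.map PySem.Dict.items = ts.map indexB := by
      apply List.ext_getElem?
      intro j
      rw [List.getElem?_map, List.getElem?_map, c4 j, hfirst]
      simp only [hts, List.getElem?_map]
      cases hr : (PySem.List.pyRange 0 m)[j]? with
      | none => rfl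
      | some v =>
          have hv := hrange_elt j v hr
          subst hv
          simp [indexB_eq _ (bucketB_nodup tl ((j : Nat) : Int))]
    exact Prod.ext hfirst hsecond

-- ===== VERDICT (by name: the statement is the Claim_ definition above) =====
theorem get_teams_of_size_spec : Claim_equal_get_teams_of_size := by
  intro teams_list _hdom hpre
  unfold Spec_get_teams_of_size
  exact portA_eq_alt teams_list hpre
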